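-- pv_equiv track=rewrite | github.com/thiago-a11y/calc_finan | core/smart_router_global.py | _detectar_prefixo
-- ===== SOURCE A (Python) =====
-- from enum import Enum
--
-- class Provider(str, Enum):
--     """Todos os providers de LLM disponíveis no sistema."""
--     # Minimax (principal — mais barato)
--     MINIMAX = "minimax"
--     # Anthropic
--     OPUS = "anthropic_opus"
--     SONNET = "anthropic_sonnet"
--     # OpenAI
--     GPT4 = "openai_gpt4"
--     # Google
--     GEMINI = "google_gemini"
--     # Open-source (velocidade)
--     GROQ = "groq_llama"
--     FIREWORKS = "fireworks_llama"
--     TOGETHER = "together_llama"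
--
-- PREFIXOS_OVERRIDE = {
--     "opus:": Provider.OPUS,
--     "sonnet:": Provider.SONNET,
--     "gpt:": Provider.GPT4,
--     "openai:": Provider.GPT4,
--     "gemini:": Provider.GEMINI,
--     "google:": Provider.GEMINI,
--     "groq:": Provider.GROQ,
--     "llama:": Provider.GROQ,
--     "fireworks:": Provider.FIREWORKS,
--     "together:": Provider.TOGETHER,
--     "rápido:": Provider.GROQ,
--     "rapido:": Provider.GROQ,
--     "fast:": Provider.GROQ,
-- }
--
-- def _detectar_prefixo(prompt: str) -> tuple[Provider | None, str]:
--     """Detecta prefixo de override no início do prompt."""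
--     prompt_stripped = prompt.strip()
--     prompt_lower = prompt_stripped.lower()
--     for prefixo, provider in PREFIXOS_OVERRIDE.items():
--         if prompt_lower.startswith(prefixo):
--             prompt_limpo = prompt_stripped[len(prefixo):].strip()
--             return provider, prompt_limpo
--     return None, prompt
-- ===== SOURCE B (Python) =====
-- from enum import Enum
--
-- class Provider(str, Enum):
--     MINIMAX = "minimax"
--     OPUS = "anthropic_opus"
--     SONNET = "anthropic_sonnet"
--     GPT4 = "openai_gpt4"
--     GEMINI = "google_gemini"
--     GROQ = "groq_llama"
--     FIREWORKS = "fireworks_llama"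
--     TOGETHER = "together_llama"
--
-- PREFIXOS_OVERRIDE = {
--     "opus:": Provider.OPUS,
--     "sonnet:": Provider.SONNET,
--     "gpt:": Provider.GPT4,
--     "openai:": Provider.GPT4,
--     "gemini:": Provider.GEMINI,
--     "google:": Provider.GEMINI,
--     "groq:": Provider.GROQ,
--     "llama:": Provider.GROQ,
--     "fireworks:": Provider.FIREWORKS,
--     "together:": Provider.TOGETHER,
--     "rápido:": Provider.GROQ,
--     "rapido:": Provider.GROQ,
--     "fast:": Provider.GROQ,
-- }
--
-- def _detectar_prefixo(prompt: str):
--     """Single partition at the first ':' plus one dict lookup instead of scanning all prefixes."""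
--     prompt_stripped = prompt.strip()
--     prompt_lower = prompt_stripped.lower()
--     head, sep, _ = prompt_lower.partition(":")
--     provider = PREFIXOS_OVERRIDE.get(head + ":") if sep else None
--     if provider is None:
--         return None, prompt
--     return provider, prompt_stripped[len(head) + 1:].strip()
-- ===== Notes on version B (the rewrite author's own statement) =====
-- stated objective: idiomatic
-- what changed: Replaced the scan over all 13 override prefixes with a single partition at the first ':' and one keyed dict lookup of head+':'.
import Mathlib
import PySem

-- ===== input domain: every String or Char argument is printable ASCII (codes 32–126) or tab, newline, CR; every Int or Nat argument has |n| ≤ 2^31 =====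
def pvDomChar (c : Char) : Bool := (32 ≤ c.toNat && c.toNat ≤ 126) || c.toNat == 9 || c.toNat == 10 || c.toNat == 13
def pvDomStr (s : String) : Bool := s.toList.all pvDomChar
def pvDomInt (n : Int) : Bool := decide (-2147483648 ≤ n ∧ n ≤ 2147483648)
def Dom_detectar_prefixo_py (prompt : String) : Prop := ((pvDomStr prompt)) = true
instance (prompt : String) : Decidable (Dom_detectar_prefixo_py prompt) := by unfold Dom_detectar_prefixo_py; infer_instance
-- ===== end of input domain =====

-- B replaces A's scan over all 13 override prefixes by one partition at the first ':' plus a single dict lookup (idiomatic).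

-- ===== PORT A =====
-- PREFIXOS_OVERRIDE (Provider enum members as their string values); all keys distinct
def pvPrefixos : List (String × String) :=
  [("opus:", "anthropic_opus"), ("sonnet:", "anthropic_sonnet"), ("gpt:", "openai_gpt4"),
   ("openai:", "openai_gpt4"), ("gemini:", "google_gemini"), ("google:", "google_gemini"),
   ("groq:", "groq_llama"), ("llama:", "groq_llama"), ("fireworks:", "fireworks_llama"),
   ("together:", "together_llama"), ("rápido:", "groq_llama"), ("rapido:", "groq_llama"),
   ("fast:", "groq_llama")]

-- the for-loop over PREFIXOS_OVERRIDE.items()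
def pvLoopA (prompt : String) (stripped lowered : List Char) :
    List (String × String) → Option String × String
  | [] => (none, prompt)
  | (prefixo, provider) :: rest =>
      if PySem.Chars.startswith lowered prefixo.toList then
        (some provider, String.ofList (PySem.Chars.strip (stripped.drop prefixo.toList.length)))
      else pvLoopA prompt stripped lowered rest

def detectar_prefixo_py (prompt : String) : Option String × String :=
  let stripped := PySem.Chars.strip prompt.toList
  let lowered := PySem.Chars.lower stripped
  pvLoopA prompt stripped lowered pvPrefixos

-- ===== PORT B =====
def detectar_prefixo_py_alt (prompt : String) : Option String × String :=
  let stripped := PySem.Chars.strip prompt.toList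
  let lowered := PySem.Chars.lower stripped
  -- head, sep, _ = prompt_lower.partition(":")  (ported by hand: head = the chars before the
  -- first ':', sep nonempty iff ':' occurs — exact for a one-character separator)
  let head := lowered.takeWhile (· != ':')
  let provider := if ':' ∈ lowered then
      (PySem.Dict.mk pvPrefixos).get? (String.ofList (head ++ [':'])) else none
  match provider with
  | none => (none, prompt)
  | some p => (some p, String.ofList (PySem.Chars.strip (stripped.drop (head.length + 1))))

-- ===== PRECONDITION & SPEC =====
def Spec_detectar_prefixo_py (prompt : String) (out : Option String × String) : Prop := out = detectar_prefixo_py_alt prompt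
instance (prompt : String) (out : Option String × String) : Decidable (Spec_detectar_prefixo_py prompt out) := by unfold Spec_detectar_prefixo_py; infer_instance

-- ===== CLAIM (what is proved, stated in full; the proofs are below) =====
def Claim_equal_detectar_prefixo_py : Prop := ∀ (prompt : String), Dom_detectar_prefixo_py prompt → Spec_detectar_prefixo_py prompt (detectar_prefixo_py prompt)

-- ===== LEMMAS AND PROOFS =====

-- a word ending in ':' with no earlier ':' is a prefix of l iff l contains ':' and
-- everything before l's first ':' is exactly that word's body
theorem pv_starts_iff (l h : List Char) (hc : ':' ∉ h) :
    ((h ++ [':']) <+: l) ↔ (':' ∈ l ∧ l.takeWhile (· != ':') = h) := by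
  induction l generalizing h with
  | nil =>
      simp only [List.takeWhile_nil, List.not_mem_nil, false_and, iff_false]
      intro hp
      simpa using hp.length_le
  | cons c l ih =>
      cases h with
      | nil =>
          by_cases hcc : c = ':'
          · subst hcc; simp [List.cons_prefix_cons]
          · simp [List.cons_prefix_cons, hcc, Ne.symm hcc]
      | cons a h' =>
          have ha : a ≠ ':' := by intro e; exact hc (by simp [e])
          have hc' : ':' ∉ h' := fun m => hc (by simp [m])
          by_cases hcc : c = ':'
          · subst hcc
            simp [List.cons_prefix_cons, ha]
          · simp only [List.cons_append, List.cons_prefix_cons, List.mem_cons,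
              List.takeWhile_cons, show (c != ':') = true by simpa using hcc, if_pos,
              ih h' hc', List.cons.injEq]
            constructor
            · rintro ⟨rfl, hm, ht⟩; exact ⟨Or.inr hm, rfl, ht⟩
            · rintro ⟨hm, rfl, ht⟩
              refine ⟨rfl, ?_, ht⟩
              rcases hm with h1 | h1
              · exact absurd h1.symm hcc
              · exact h1

-- A's scan over an association list whose keys all end in ':' (and contain no other ':')
-- computes exactly B's partition-and-lookup
theorem pv_loop_eq (prompt : String) (stripped lowered : List Char)
    (ps : List (String × String))
    (Hps : ∀ q ∈ ps, ∃ h, ':' ∉ h ∧ q.1.toList = h ++ [':']) :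
    pvLoopA prompt stripped lowered ps =
      (match (if ':' ∈ lowered then
          (PySem.Dict.mk ps).get?
            (String.ofList (lowered.takeWhile (· != ':') ++ [':'])) else none) with
       | none => (none, prompt)
       | some p => (some p,
           String.ofList (PySem.Chars.strip
             (stripped.drop ((lowered.takeWhile (· != ':')).length + 1))))) := by
  induction ps with
  | nil =>
      have : ∀ k, (PySem.Dict.mk ([] : List (String × String))).get? k = none := by
        intro k; rfl
      simp [pvLoopA, this]
  | cons q rest ih =>
      obtain ⟨p, v⟩ := q
      obtain ⟨h, hc, hp⟩ := Hps (p, v) (List.mem_cons_self ..)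
      have hpstr : p = String.ofList (h ++ [':']) := by
        have := congrArg String.ofList hp
        simpa using this
      have ihyp := ih (fun q hq => Hps q (List.mem_cons_of_mem _ hq))
      by_cases hs : PySem.Chars.startswith lowered p.toList = true
      · -- the scan hits this prefix
        have hpref : (h ++ [':']) <+: lowered := by
          rw [← hp]; exact (PySem.Chars.startswith_iff ..).mp hs
        obtain ⟨hm, ht⟩ := (pv_starts_iff lowered h hc).mp hpref
        have hkey : String.ofList (lowered.takeWhile (· != ':') ++ [':']) = p := by
          rw [ht, hpstr]
        have hget : (PySem.Dict.mk ((p, v) :: rest)).get?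
            (String.ofList (lowered.takeWhile (· != ':') ++ [':'])) = some v := by
          rw [hkey, PySem.Dict.get?_mk_cons]
          simp
        simp only [pvLoopA, hs, if_pos, if_pos hm, hget]
        have hlen : p.toList.length = (lowered.takeWhile (· != ':')).length + 1 := by
          rw [hp, ht]; simp
        rw [hlen]
      · -- the scan skips this prefix
        simp only [pvLoopA, hs, Bool.false_eq_true, if_false]
        rw [ihyp]
        by_cases hm : ':' ∈ lowered
        · have hne : (String.ofList (lowered.takeWhile (· != ':') ++ [':'])) ≠ p := by
            intro e
            apply hs
            rw [(PySem.Chars.startswith_iff ..), hp, pv_starts_iff lowered h hc]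
            refine ⟨hm, ?_⟩
            have := congrArg String.toList e
            rw [hpstr] at this
            simpa using this
          have hbeq : (p == String.ofList (lowered.takeWhile (· != ':') ++ [':'])) = false :=
            beq_eq_false_iff_ne.mpr (fun e => hne e.symm)
          have hskip : (PySem.Dict.mk ((p, v) :: rest)).get?
              (String.ofList (lowered.takeWhile (· != ':') ++ [':'])) =
              (PySem.Dict.mk rest).get?
              (String.ofList (lowered.takeWhile (· != ':') ++ [':'])) := by
            rw [PySem.Dict.get?_mk_cons, hbeq]
            simp
          simp only [if_pos hm, hskip]
        · simp only [if_neg hm]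

-- every key of PREFIXOS_OVERRIDE is a body without ':' followed by a final ':'
theorem pv_key_shape (s : String) (h1 : s.toList.getLast? = some ':')
    (h2 : ':' ∉ s.toList.dropLast) : ∃ h, ':' ∉ h ∧ s.toList = h ++ [':'] := by
  refine ⟨s.toList.dropLast, h2, ?_⟩
  have hn : s.toList ≠ [] := by intro e; rw [e] at h1; simp at h1
  have := List.dropLast_append_getLast hn
  rw [List.getLast?_eq_some_getLast hn, Option.some.injEq] at h1
  rw [h1] at this
  exact this.symm

theorem pvPrefixos_keys : ∀ q ∈ pvPrefixos, ∃ h, ':' ∉ h ∧ q.1.toList = h ++ [':'] := by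
  have H : ∀ q ∈ pvPrefixos,
      q.1.toList.getLast? = some ':' ∧ ':' ∉ q.1.toList.dropLast := by decide
  exact fun q hq => pv_key_shape q.1 (H q hq).1 (H q hq).2

-- ===== VERDICT (by name: the statement is the Claim_ definition above) =====
theorem detectar_prefixo_py_spec : Claim_equal_detectar_prefixo_py := by
  intro prompt _
  unfold Spec_detectar_prefixo_py
  simp only [detectar_prefixo_py, detectar_prefixo_py_alt]
  rw [pv_loop_eq _ _ _ _ pvPrefixos_keys]
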